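-- pv_equiv track=rewrite | github.com/laknath/codeforces | vacation.py | greedy_lookup
-- ===== SOURCE A (Python) =====
-- def greedy_best_choice(days):
--     """Select best option in case of 3 when prev rested"""
--     if len(days) == 0:
--         return 1 # no effect or 1 or 2
--
--     cur = days[0]
--     if cur == 3:
--         cur = greedy_best_choice(days[1:])
--
--     if cur == 1:
--         return 2
--     elif cur == 2:
--         return 1
--     else:
--         return 1
--
-- def greedy_lookup(days):
--     """Strategy: Don't postpone to another day"""
--     prev = 0 # 0: nothing, 1: contest, 2: Gim
--     rest = 0
--
--     for i, d in enumerate(days):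
--         if d == 0:
--             rest += 1
--             prev = 0
--         elif d == 1:
--             if prev == 1:
--                 rest += 1
--                 prev = 0
--             else:
--                 prev = 1
--         elif d == 2:
--             if prev == 2:
--                 rest += 1
--                 prev = 0
--             else:
--                 prev = 2
--         elif d == 3:
--             if prev == 1:
--                 prev = 2
--             elif prev == 2:
--                 prev = 1
--             elif prev == 0:
--                 prev = greedy_best_choice(days[i+1:])
--         #print prev
--
--     return rest
-- ===== SOURCE B (Python) =====
-- def greedy_lookup(days):
--     """Strategy: Don't postpone to another day (run-compression: whole blocks of
--     3-days are skipped in one step; a block leaves prev equal to the opposite of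
--     the next relevant day when entered free, or parity-flips it otherwise)."""
--     n = len(days)
--     rest = 0
--     prev = 0  # 0: nothing, 1: contest, 2: gym
--     i = 0
--     while i < n:
--         d = days[i]
--         if d == 3:
--             j = i
--             while j < n and days[j] == 3:
--                 j += 1
--             if prev == 0:
--                 prev = 2 if (j < n and days[j] == 1) else 1
--             elif (j - i) % 2 == 1:
--                 prev = 3 - prev
--             i = j
--         elif d in (0, 1, 2):
--             if d == 0 or prev == d:
--                 rest += 1
--                 prev = 0
--             else:
--                 prev = d
--             i += 1
--         else:
--             i += 1
--     return rest
-- ===== Notes on version B (the rewrite author's own statement) =====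
-- stated objective: alternative
-- what changed: Replaces A's per-day recursive lookahead over the slice days[i+1:] with run-compression: an index-based while loop consumes each maximal block of 3-days in one step, setting prev to the opposite of the day after the block (or parity-flipping it), so the O(n^2) worst-case lookahead becomes O(n) with no recursion and no slicing.
import Mathlib
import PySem

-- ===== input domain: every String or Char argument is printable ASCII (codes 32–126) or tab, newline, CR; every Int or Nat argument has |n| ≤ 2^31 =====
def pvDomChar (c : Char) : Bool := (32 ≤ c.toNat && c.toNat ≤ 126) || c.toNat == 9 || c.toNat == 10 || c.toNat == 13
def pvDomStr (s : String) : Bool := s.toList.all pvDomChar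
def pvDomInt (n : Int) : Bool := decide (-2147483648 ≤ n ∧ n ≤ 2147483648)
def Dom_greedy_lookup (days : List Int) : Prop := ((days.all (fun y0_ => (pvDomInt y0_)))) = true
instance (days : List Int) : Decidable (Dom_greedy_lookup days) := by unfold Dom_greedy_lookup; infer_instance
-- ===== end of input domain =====

-- B replaces A's per-day recursive lookahead with run-compression: each maximal block of
-- 3-days is consumed in one step (an alternative decomposition; not measured faster).

-- ===== PORT A =====
-- greedy_best_choice, literal
def gbc : List Int → Int
  | [] => 1
  | d :: rest =>
    let cur := if d = 3 then gbc rest else d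
    if cur = 1 then 2 else if cur = 2 then 1 else 1

-- the 'for i, d in enumerate(days)' loop of A; 'full' is days (for the slice days[i+1:])
def glLoopA (full : List Int) : List (Int × Int) → Int → Int → Int
  | [], _, rest => rest
  | (i, d) :: t, prev, rest =>
    if d = 0 then glLoopA full t 0 (rest + 1)
    else if d = 1 then
      (if prev = 1 then glLoopA full t 0 (rest + 1) else glLoopA full t 1 rest)
    else if d = 2 then
      (if prev = 2 then glLoopA full t 0 (rest + 1) else glLoopA full t 2 rest)
    else if d = 3 then
      (if prev = 1 then glLoopA full t 2 rest
       else if prev = 2 then glLoopA full t 1 rest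
       else if prev = 0 then glLoopA full t (gbc (PySem.List.slice full (some (i + 1)) none)) rest
       else glLoopA full t prev rest)
    else glLoopA full t prev rest

def greedy_lookup (days : List Int) : Int :=
  glLoopA days (PySem.List.enumerate days) 0 0

-- ===== PORT B =====
-- the inner 'while days[j] == 3' scan: length of the leading run of 3s, and what follows it
def run3 : List Int → Nat × List Int
  | [] => (0, [])
  | d :: t => if d = 3 then ((run3 t).1 + 1, (run3 t).2) else (0, d :: t)

theorem run3_len_le : ∀ (l : List Int), (run3 l).2.length ≤ l.length := by
  intro l
  induction l with
  | nil => simp [run3]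
  | cons d t ih => by_cases h : d = 3 <;> simp [run3, h] <;> omega

-- the outer while loop of B: consume one day, or one whole block of 3s, per step
def glB : List Int → Int → Int → Int
  | [], _, rest => rest
  | d :: t, prev, rest =>
    if d = 3 then
      let r := (run3 t).2
      let prev' :=
        if prev = 0 then (if r.headD 0 = 1 then 2 else 1)
        else if ((run3 t).1 + 1) % 2 = 1 then 3 - prev else prev
      glB r prev' rest
    else if d = 0 ∨ d = 1 ∨ d = 2 then
      (if d = 0 ∨ prev = d then glB t 0 (rest + 1) else glB t d rest)
    else glB t prev rest
  termination_by l => l.length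
  decreasing_by
    · exact Nat.lt_succ_of_le (run3_len_le t)
    all_goals simp

def greedy_lookup_alt (days : List Int) : Int := glB days 0 0

-- ===== PRECONDITION & SPEC =====
def Spec_greedy_lookup (days : List Int) (out : Int) : Prop := out = greedy_lookup_alt days
instance (days : List Int) (out : Int) : Decidable (Spec_greedy_lookup days out) := by unfold Spec_greedy_lookup; infer_instance

-- ===== CLAIM (what is proved, stated in full; the proofs are below) =====
def Claim_equal_greedy_lookup : Prop := ∀ (days : List Int), Dom_greedy_lookup days → Spec_greedy_lookup days (greedy_lookup days)

-- ===== LEMMAS AND PROOFS =====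

theorem gbc_mem (t : List Int) : gbc t = 1 ∨ gbc t = 2 := by
  induction t with
  | nil => simp [gbc]
  | cons d r ih => simp only [gbc]; split_ifs <;> simp

theorem run3_fst_three (s : List Int) : (run3 ((3 : Int) :: s)).1 = (run3 s).1 + 1 := by
  simp [run3]

theorem run3_snd_three (s : List Int) : (run3 ((3 : Int) :: s)).2 = (run3 s).2 := by
  simp [run3]

-- one step of B's outer loop on a 3-day, written out
theorem glB_cons_three (t : List Int) (prev rest : Int) :
    glB (3 :: t) prev rest =
      glB (run3 t).2
        (if prev = 0 then (if (run3 t).2.headD 0 = 1 then 2 else 1)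
         else if ((run3 t).1 + 1) % 2 = 1 then 3 - prev else prev) rest := by
  simp only [glB]
  norm_num

-- B skips a 3-day by flipping a nonzero prev
theorem glB_three_flip (t : List Int) (prev rest : Int) (h : prev = 1 ∨ prev = 2) :
    glB (3 :: t) prev rest = glB t (3 - prev) rest := by
  have hp : prev ≠ 0 := by rcases h with h | h <;> simp [h]
  have hp' : (3 : Int) - prev ≠ 0 := by rcases h with h | h <;> simp [h]
  rw [glB_cons_three, if_neg hp]
  cases t with
  | nil => simp [run3, glB]
  | cons x s =>
    by_cases hx : x = 3
    · subst hx
      rw [glB_cons_three, if_neg hp', run3_fst_three, run3_snd_three]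
      congr 1
      by_cases hn : (run3 s).1 % 2 = 1
      · rw [if_pos (by omega), if_neg (by omega)]
      · rw [if_neg (by omega), if_pos (by omega)]; ring
    · rw [show (run3 (x :: s)).1 = 0 from by simp [run3, hx],
        show (run3 (x :: s)).2 = x :: s from by simp [run3, hx]]
      norm_num

-- B entering a block of 3s with prev = 0 behaves like continuing with prev = gbc of the tail
theorem glB_three_zero (t : List Int) (rest : Int) :
    glB (3 :: t) 0 rest = glB t (gbc t) rest := by
  rw [glB_cons_three, if_pos rfl]
  induction t with
  | nil => simp [run3, glB, gbc]
  | cons x s ih =>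
    by_cases hx : x = 3
    · subst hx
      rw [run3_snd_three, ih, glB_three_flip s _ rest (gbc_mem _)]
      have h33 : (3 : Int) - gbc (3 :: s) = gbc s := by
        simp only [gbc, if_pos rfl]
        rcases gbc_mem s with h | h <;> simp [h]
      rw [h33]
    · have hgbc : gbc (x :: s) = if x = 1 then 2 else 1 := by
        simp only [gbc, if_neg hx]
        split_ifs <;> simp_all
      rw [show (run3 (x :: s)).2 = x :: s from by simp [run3, hx], hgbc]
      simp

theorem main_eq (t : List Int) :
    ∀ (full : List Int) (k : Nat), full.drop k = t →
    ∀ prev rest, (prev = 0 ∨ prev = 1 ∨ prev = 2) →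
      glLoopA full (PySem.List.enumerate t (k : Int)) prev rest = glB t prev rest := by
  induction t with
  | nil => intro full k _ prev rest _; simp [glLoopA, glB, PySem.List.enumerate_nil]
  | cons d t' ih =>
    intro full k hdrop prev rest hprev
    have hdrop' : full.drop (k + 1) = t' := by
      rw [← List.tail_drop, hdrop]; rfl
    have hslice : PySem.List.slice full (some ((k + 1 : Nat) : Int)) none = t' := by
      rw [PySem.List.slice_from_natCast, hdrop']
    have hcast : ((k : Int) + 1) = ((k + 1 : Nat) : Int) := by push_cast; ring
    have ih2 : ∀ prev rest, (prev = 0 ∨ prev = 1 ∨ prev = 2) →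
        glLoopA full (PySem.List.enumerate t' ((k : Int) + 1)) prev rest = glB t' prev rest := by
      intro p r h; rw [hcast]; exact ih full (k + 1) hdrop' p r h
    rw [PySem.List.enumerate_cons]
    by_cases h3 : d = 3
    · subst h3
      rcases hprev with hp | hp | hp <;> subst hp
      · simp only [glLoopA, hcast, hslice]
        norm_num
        rw [ih2 (gbc t') rest (by rcases gbc_mem t' with h | h <;> simp [h]),
          glB_three_zero]
      · simp only [glLoopA]
        norm_num
        rw [ih2 2 rest (by norm_num), glB_three_flip t' 1 rest (Or.inl rfl)]
        norm_num
      · simp only [glLoopA]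
        norm_num
        rw [ih2 1 rest (by norm_num), glB_three_flip t' 2 rest (Or.inr rfl)]
        norm_num
    · by_cases h0 : d = 0
      · subst h0
        simp only [glLoopA, glB]
        norm_num
        exact ih2 0 (rest + 1) (by norm_num)
      · by_cases h1 : d = 1
        · subst h1
          simp only [glLoopA, glB]
          norm_num
          by_cases hp : prev = 1
          · rw [if_pos hp, if_pos hp]
            exact ih2 0 (rest + 1) (by norm_num)
          · rw [if_neg hp, if_neg hp]
            exact ih2 1 rest (by norm_num)
        · by_cases h2 : d = 2
          · subst h2
            simp only [glLoopA, glB]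
            norm_num
            by_cases hp : prev = 2
            · rw [if_pos hp, if_pos hp]
              exact ih2 0 (rest + 1) (by norm_num)
            · rw [if_neg hp, if_neg hp]
              exact ih2 2 rest (by norm_num)
          · simp only [glLoopA, glB]
            rw [if_neg h0, if_neg h1, if_neg h2, if_neg h3, if_neg h3,
              if_neg (by simp [h0, h1, h2] : ¬(d = 0 ∨ d = 1 ∨ d = 2))]
            exact ih2 prev rest hprev

-- ===== VERDICT (by name: the statement is the Claim_ definition above) =====
theorem greedy_lookup_spec : Claim_equal_greedy_lookup := by
  intro days _
  unfold Spec_greedy_lookup greedy_lookup greedy_lookup_alt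
  exact main_eq days days 0 (by simp) 0 0 (Or.inl rfl)
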